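-- pv_equiv track=rewrite | github.com/rfoldhzi/Tussel_Online | TacticalStuff/tacticmethods.py | findPatternPoints
-- ===== SOURCE A (Python) =====
-- def findStartSpot(pattern: tuple):
--     for y in range(len(pattern)):
--         for x in range(len(pattern[0])):
--             if pattern[y][x] == 'S':
--                 return x,y
--     return None
--
-- def findPatternPoints(pattern: tuple, pos:tuple):
--     startOffset = findStartSpot(pattern=pattern)
--     offsetX = startOffset[0]+pos[0]
--     offsetY = startOffset[1]+pos[1]
--
--     points = []
--     for y in range(len(pattern)):
--         for x in range(len(pattern[0])):
--             if pattern[y][x] == 'X':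
--                 points.append((x+offsetX,y+offsetY))
--
--     return points
-- ===== SOURCE B (Python) =====
-- def findPatternPoints(pattern: tuple, pos: tuple):
--     # single fused pass: collect raw 'X' coordinates and remember the first 'S',
--     # then apply the offset in one mapping phase
--     width = len(pattern[0])
--     raw = []
--     start = None
--     for y, row in enumerate(pattern):
--         for x in range(width):
--             c = row[x]
--             if c == 'X':
--                 raw.append((x, y))
--             if c == 'S' and start is None:
--                 start = (x, y)
--     sx, sy = start
--     return [(x + sx + pos[0], y + sy + pos[1]) for (x, y) in raw]
-- ===== Notes on version B (the rewrite author's own statement) =====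
-- stated objective: alternative
-- what changed: fuses A's two full grid scans (findStartSpot plus the point-collecting scan) into one single pass that simultaneously records raw X coordinates and the first S, then applies the offset in a separate map phase
import Mathlib
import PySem

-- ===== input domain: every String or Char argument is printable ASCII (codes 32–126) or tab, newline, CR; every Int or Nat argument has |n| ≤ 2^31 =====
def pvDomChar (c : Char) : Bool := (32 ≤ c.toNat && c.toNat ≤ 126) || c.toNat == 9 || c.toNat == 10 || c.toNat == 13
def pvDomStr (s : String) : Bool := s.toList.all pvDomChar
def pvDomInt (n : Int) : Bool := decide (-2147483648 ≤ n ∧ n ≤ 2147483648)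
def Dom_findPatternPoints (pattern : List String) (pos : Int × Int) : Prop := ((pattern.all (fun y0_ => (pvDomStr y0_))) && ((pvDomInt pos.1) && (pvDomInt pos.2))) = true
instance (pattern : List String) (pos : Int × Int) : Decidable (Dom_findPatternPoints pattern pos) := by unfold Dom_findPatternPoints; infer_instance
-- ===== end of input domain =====

-- B fuses A's two full grid scans into one pass that collects raw 'X' coordinates and
-- remembers the first 'S', then applies the offset in a separate map phase (alternative
-- decomposition, same asymptotic cost); return-value equivalence proved on Pre_.


-- ===== PORT A =====
-- helper: findStartSpot — nested search with early return; PySem.Str.pyGet? is exact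
-- where Python indexes in range (out-of-range indexing raises in Python; excluded by Pre_)
def pvFindStartSpot (pattern : List String) : Option (Int × Int) :=
  (List.range pattern.length).findSome? (fun (y : Nat) =>
    (List.range (pattern.headD "").length).findSome? (fun (x : Nat) =>
      if PySem.Str.pyGet? (pattern.getD y "") (x : Int) = some 'S'
      then some ((x : Int), (y : Int)) else none))

def findPatternPoints (pattern : List String) (pos : Int × Int) : List (Int × Int) :=
  match pvFindStartSpot pattern with
  | none => []    -- Python raises TypeError here (startOffset is None); excluded by Pre_
  | some startOffset =>
    let offsetX := startOffset.1 + pos.1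
    let offsetY := startOffset.2 + pos.2
    (List.range pattern.length).foldl (fun points (y : Nat) =>
      (List.range (pattern.headD "").length).foldl (fun points (x : Nat) =>
        if PySem.Str.pyGet? (pattern.getD y "") (x : Int) = some 'X'
        then points ++ [((x : Int) + offsetX, (y : Int) + offsetY)] else points) points) []

-- ===== PORT B =====
def findPatternPoints_alt (pattern : List String) (pos : Int × Int) : List (Int × Int) :=
  let width := (pattern.headD "").length
  let st := (PySem.List.enumerate pattern).foldl
    (fun (st : List (Int × Int) × Option (Int × Int)) p =>
      (List.range width).foldl (fun st (x : Nat) =>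
        (if PySem.Str.pyGet? p.2 (x : Int) = some 'X' then st.1 ++ [((x : Int), p.1)] else st.1,
         if PySem.Str.pyGet? p.2 (x : Int) = some 'S' ∧ st.2 = none
         then some ((x : Int), p.1) else st.2)) st)
    ([], none)
  match st.2 with
  | none => []    -- Python B raises TypeError here (unpacking None); excluded by Pre_
  | some s => st.1.map (fun q => (q.1 + s.1 + pos.1, q.2 + s.2 + pos.2))

-- ===== PRECONDITION & SPEC =====
-- Pre_ = exactly the inputs where Python A returns: a nonempty pattern (else len(pattern[0])
-- raises IndexError), every row at least as long as row 0 (else pattern[y][x] raises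
-- IndexError), and an 'S' in the scanned region (else startOffset is None and A raises TypeError).
def Pre_findPatternPoints (pattern : List String) (pos : Int × Int) : Prop :=
  pattern ≠ [] ∧
  (∀ row ∈ pattern, (pattern.headD "").length ≤ row.length) ∧
  ∃ y < pattern.length, ∃ x < (pattern.headD "").length,
    (pattern.getD y "").toList.getD x ' ' = 'S'
instance (pattern : List String) (pos : Int × Int) : Decidable (Pre_findPatternPoints pattern pos) := by
  unfold Pre_findPatternPoints; infer_instance
def pvWitness_findPatternPoints : List String × (Int × Int) := (["XS", ".X"], (10, 20))

def Spec_findPatternPoints (pattern : List String) (pos : Int × Int) (out : List (Int × Int)) : Prop := out = findPatternPoints_alt pattern pos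
instance (pattern : List String) (pos : Int × Int) (out : List (Int × Int)) : Decidable (Spec_findPatternPoints pattern pos out) := by unfold Spec_findPatternPoints; infer_instance

-- ===== CLAIM (what is proved, stated in full; the proofs are below) =====
def Claim_equal_findPatternPoints : Prop := ∀ (pattern : List String) (pos : Int × Int), Dom_findPatternPoints pattern pos → Pre_findPatternPoints pattern pos → Spec_findPatternPoints pattern pos (findPatternPoints pattern pos)

-- ===== LEMMAS AND PROOFS =====

-- the raw 'X' points of one row, and the first 'S' of one row
def pvRawRow (w : Nat) (p : Int × String) : List (Int × Int) :=
  ((List.range w).filter (fun (x : Nat) => decide (PySem.Str.pyGet? p.2 (x : Int) = some 'X'))).map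
    (fun (x : Nat) => ((x : Int), p.1))
def pvSRow (w : Nat) (p : Int × String) : Option (Int × Int) :=
  (List.range w).findSome? (fun (x : Nat) =>
    if PySem.Str.pyGet? p.2 (x : Int) = some 'S' then some ((x : Int), p.1) else none)

-- B's inner loop over one row, characterised
theorem pvInner (l : List Nat) (p : Int × String) (st : List (Int × Int) × Option (Int × Int)) :
    l.foldl (fun st (x : Nat) =>
        (if PySem.Str.pyGet? p.2 (x : Int) = some 'X' then st.1 ++ [((x : Int), p.1)] else st.1,
         if PySem.Str.pyGet? p.2 (x : Int) = some 'S' ∧ st.2 = none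
         then some ((x : Int), p.1) else st.2)) st
    = (st.1 ++ (l.filter (fun (x : Nat) => decide (PySem.Str.pyGet? p.2 (x : Int) = some 'X'))).map
          (fun (x : Nat) => ((x : Int), p.1)),
       st.2.or (l.findSome? (fun (x : Nat) =>
         if PySem.Str.pyGet? p.2 (x : Int) = some 'S' then some ((x : Int), p.1) else none))) := by
  induction l generalizing st with
  | nil => simp
  | cons a t ih =>
    rw [List.foldl_cons, ih]
    by_cases hX : p.2.toList[a]? = some 'X' <;>
    by_cases hS : p.2.toList[a]? = some 'S' <;>
    cases h2 : st.2 <;>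
    simp [List.filter_cons, List.findSome?_cons, hX, hS, h2, Option.some_or, Option.none_or]

-- B's outer loop over the enumerated rows, characterised
theorem pvOuter (rows : List (Int × String)) (w : Nat)
    (st : List (Int × Int) × Option (Int × Int)) :
    rows.foldl (fun st p =>
        (List.range w).foldl (fun st (x : Nat) =>
          (if PySem.Str.pyGet? p.2 (x : Int) = some 'X' then st.1 ++ [((x : Int), p.1)] else st.1,
           if PySem.Str.pyGet? p.2 (x : Int) = some 'S' ∧ st.2 = none
           then some ((x : Int), p.1) else st.2)) st) st
    = (st.1 ++ rows.flatMap (pvRawRow w), st.2.or (rows.findSome? (pvSRow w))) := by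
  induction rows generalizing st with
  | nil => simp
  | cons r t ih =>
    rw [List.foldl_cons, ih, pvInner]
    refine Prod.ext ?_ ?_
    · simp [pvRawRow, List.append_assoc]
    · show (st.2.or (pvSRow w r)).or _ = _
      rw [Option.or_assoc, List.findSome?_cons]
      cases pvSRow w r <;> simp

-- A's point-collecting inner loop, characterised
theorem pvAinner (l : List Nat) (row : String) (oX oY : Int) (y : Nat)
    (pts : List (Int × Int)) :
    l.foldl (fun pts (x : Nat) =>
        if PySem.Str.pyGet? row (x : Int) = some 'X'
        then pts ++ [((x : Int) + oX, (y : Int) + oY)] else pts) pts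
    = pts ++ (l.filter (fun (x : Nat) => decide (PySem.Str.pyGet? row (x : Int) = some 'X'))).map
        (fun (x : Nat) => ((x : Int) + oX, (y : Int) + oY)) := by
  induction l generalizing pts with
  | nil => simp
  | cons a t ih =>
    rw [List.foldl_cons, ih, List.filter_cons]
    by_cases hX : row.toList[a]? = some 'X' <;> simp [hX]

-- A's point-collecting outer loop, characterised
theorem pvAouter (l : List Nat) (pattern : List String) (w : Nat) (oX oY : Int)
    (pts : List (Int × Int)) :
    l.foldl (fun pts (y : Nat) =>
        (List.range w).foldl (fun pts (x : Nat) =>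
          if PySem.Str.pyGet? (pattern.getD y "") (x : Int) = some 'X'
          then pts ++ [((x : Int) + oX, (y : Int) + oY)] else pts) pts) pts
    = pts ++ l.flatMap (fun (y : Nat) =>
        ((List.range w).filter (fun (x : Nat) =>
            decide (PySem.Str.pyGet? (pattern.getD y "") (x : Int) = some 'X'))).map
          (fun (x : Nat) => ((x : Int) + oX, (y : Int) + oY))) := by
  induction l generalizing pts with
  | nil => simp
  | cons a t ih => rw [List.foldl_cons, ih, pvAinner]; simp

-- enumerate as a map over the index range
theorem pvEnum (pattern : List String) :
    PySem.List.enumerate pattern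
    = (List.range pattern.length).map (fun (y : Nat) => ((y : Int), pattern.getD y "")) := by
  apply List.ext_getElem
  · simp [PySem.List.length_enumerate]
  · intro k h1 h2
    have hk : k < pattern.length := by
      simpa [PySem.List.length_enumerate] using h1
    simp [PySem.List.getElem_enumerate, hk]

-- A's findStartSpot equals B's fused first-'S' search
theorem pvStart (pattern : List String) :
    pvFindStartSpot pattern
    = (PySem.List.enumerate pattern).findSome? (pvSRow ((pattern.headD "").length)) := by
  rw [pvEnum, List.findSome?_map]
  simp [pvFindStartSpot, pvSRow, Function.comp_def]

theorem pvMainEq (pattern : List String) (pos : Int × Int) :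
    findPatternPoints pattern pos = findPatternPoints_alt pattern pos := by
  simp only [findPatternPoints, findPatternPoints_alt]
  rw [pvStart, pvOuter]
  simp only [List.nil_append, Option.none_or]
  cases hs : ((PySem.List.enumerate pattern).findSome? (pvSRow ((pattern.headD "").length))) with
  | none => rfl
  | some s =>
    simp only []
    rw [pvAouter, List.nil_append, pvEnum]
    simp [pvRawRow, List.map_flatMap, List.flatMap_map, List.map_map, Function.comp_def, add_assoc]

-- ===== VERDICT (by name: the statement is the Claim_ definition above) =====
theorem findPatternPoints_spec : Claim_equal_findPatternPoints := by
  intro pattern pos _ _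
  unfold Spec_findPatternPoints
  exact pvMainEq pattern pos
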